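-- pv_equiv track=rewrite | github.com/facebookresearch/fvcore | fvcore/nn/print_model_statistics.py | _try_combine
-- ===== SOURCE A (Python) =====
-- from typing import Any, Dict, Iterable, List, Optional, Set, Tuple
--
-- def _try_combine(
--     stats1: Dict[str, str], stats2: Dict[str, str]
-- ) -> Optional[Dict[str, str]]:
--     """
--     Try combine two statistics dict to display in one row. If they conflict,
--     returns None.
--     """
--     ret = {}
--     if set(stats1.keys()) != set(stats2.keys()):
--         return None
--     for k, v1 in stats1.items():
--         v2 = stats2[k]
--         if v1 != v2 and len(v1) and len(v2):
--             return None
--         ret[k] = v1 if len(v1) else v2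
--     return ret
-- ===== SOURCE B (Python) =====
-- from typing import Dict, Optional
--
-- def _try_combine(
--     stats1: Dict[str, str], stats2: Dict[str, str]
-- ) -> Optional[Dict[str, str]]:
--     """Set-algebra reimplementation: pool all nonempty bindings from both dicts
--     into one set of (key, value) pairs; a conflict exists exactly when two
--     distinct pairs share a key, detected by comparing cardinalities."""
--     if set(stats1) != set(stats2):
--         return None
--     pool = {p for p in stats1.items() if p[1]} | {p for p in stats2.items() if p[1]}
--     merged = dict(pool)
--     if len(merged) != len(pool):
--         return None
--     return {k: merged.get(k, "") for k in stats1}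
-- ===== Notes on version B (the rewrite author's own statement) =====
-- stated objective: alternative
-- what changed: A's fused per-key loop (compare against stats2, early-return on conflict, mutate an accumulator dict) is replaced by a set-algebra algorithm: pool the nonempty (key, value) pairs of both dicts into one set, detect a conflict purely by comparing the number of distinct keys with the pool's cardinality, and answer all lookups from the pooled dict.
import Mathlib
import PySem

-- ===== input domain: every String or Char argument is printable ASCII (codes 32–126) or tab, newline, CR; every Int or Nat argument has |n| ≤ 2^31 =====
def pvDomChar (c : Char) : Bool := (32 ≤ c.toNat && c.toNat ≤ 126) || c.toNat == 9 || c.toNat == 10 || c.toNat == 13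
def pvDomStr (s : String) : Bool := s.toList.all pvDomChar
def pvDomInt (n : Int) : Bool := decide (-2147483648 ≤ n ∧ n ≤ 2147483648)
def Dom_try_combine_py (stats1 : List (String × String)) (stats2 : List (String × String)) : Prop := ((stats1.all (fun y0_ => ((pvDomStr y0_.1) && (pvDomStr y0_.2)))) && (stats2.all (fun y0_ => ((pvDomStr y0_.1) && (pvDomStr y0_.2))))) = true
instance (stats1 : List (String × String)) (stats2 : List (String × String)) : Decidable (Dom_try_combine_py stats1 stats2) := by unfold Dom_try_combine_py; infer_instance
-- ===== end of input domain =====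

-- B replaces A's fused early-returning merge loop by a set-algebra algorithm: pool the
-- nonempty (key, value) pairs of both dicts into one set, detect a conflict by comparing
-- the number of distinct keys with the size of the pool, then answer lookups from that
-- pool. Objective: alternative (a genuinely different algorithm, same cost).

-- ===== PORT A =====
-- the 'for k, v1 in stats1.items()' loop with its early 'return None' and the mutated dict 'ret'
def tcA_loop (d2 : PySem.Dict String String) :
    List (String × String) → PySem.Dict String String → Option (PySem.Dict String String)
  | [], ret => some ret
  | p :: rest, ret =>
      let v2 := d2.getD p.1 ""   -- stats2[k]; the key-set equality check already passed, so the key is present and the default is unreachable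
      if p.2 ≠ v2 ∧ p.2 ≠ "" ∧ v2 ≠ "" then none
      else tcA_loop d2 rest (ret.insert p.1 (if p.2 != "" then p.2 else v2))

def try_combine_py (stats1 : List (String × String)) (stats2 : List (String × String)) : Option (List (String × String)) :=
  let d1 := PySem.Dict.ofList stats1
  let d2 := PySem.Dict.ofList stats2
  if PySem.Set.equal (PySem.Set.ofList d1.keys) (PySem.Set.ofList d2.keys) = false then none
  else (tcA_loop d2 d1.items PySem.Dict.empty).map (·.items)

-- ===== PORT B =====
-- pool = {p for p in stats1.items() if p[1]} | {p for p in stats2.items() if p[1]};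
-- merged = dict(pool); conflict iff len(merged) != len(pool); else answer from merged.
-- (dict(pool) is only compared by size / looked up, so Python's set iteration order cannot
-- be observed in the result.)
def try_combine_py_alt (stats1 : List (String × String)) (stats2 : List (String × String)) : Option (List (String × String)) :=
  let d1 := PySem.Dict.ofList stats1
  let d2 := PySem.Dict.ofList stats2
  if PySem.Set.equal (PySem.Set.ofList d1.keys) (PySem.Set.ofList d2.keys) = false then none
  else
    let pool := PySem.Set.union (PySem.Set.ofList (d1.items.filter (fun p => p.2 != "")))
                                (PySem.Set.ofList (d2.items.filter (fun p => p.2 != "")))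
    let merged := PySem.Dict.ofList pool
    if merged.size ≠ pool.length then none
    else some (d1.keys.map (fun k => (k, merged.getD k "")))

-- ===== PRECONDITION & SPEC =====
def Spec_try_combine_py (stats1 : List (String × String)) (stats2 : List (String × String)) (out : Option (List (String × String))) : Prop := out = try_combine_py_alt stats1 stats2
instance (stats1 : List (String × String)) (stats2 : List (String × String)) (out : Option (List (String × String))) : Decidable (Spec_try_combine_py stats1 stats2 out) := by unfold Spec_try_combine_py; infer_instance

-- ===== CLAIM =====
def Claim_equal_try_combine_py : Prop := ∀ (stats1 : List (String × String)) (stats2 : List (String × String)), Dom_try_combine_py stats1 stats2 → Spec_try_combine_py stats1 stats2 (try_combine_py stats1 stats2)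

-- ===== LEMMAS AND PROOFS =====

-- the per-item conflict test 'v1 != stats2[k] and v1 and stats2[k]', used only by the proofs
def tcConflict (d2 : PySem.Dict String String) (p : String × String) : Bool :=
  p.2 != d2.getD p.1 "" && p.2 != "" && d2.getD p.1 "" != ""
theorem mem_pool (d1 d2 : PySem.Dict String String) (p : String × String) :
    p ∈ PySem.Set.union (PySem.Set.ofList (d1.items.filter (fun p => p.2 != "")))
          (PySem.Set.ofList (d2.items.filter (fun p => p.2 != ""))) ↔
      (p ∈ d1.items ∨ p ∈ d2.items) ∧ p.2 ≠ "" := by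
  simp [PySem.Set.mem_union, PySem.Set.mem_ofList, List.mem_filter, bne_iff_ne]
  tauto
theorem nodup_pool (d1 d2 : PySem.Dict String String) :
    (PySem.Set.union (PySem.Set.ofList (d1.items.filter (fun p => p.2 != "")))
       (PySem.Set.ofList (d2.items.filter (fun p => p.2 != "")))).Nodup :=
  PySem.Set.nodup_union _ _ (PySem.Set.nodup_ofList _)
theorem getD_mem_keys (d : PySem.Dict String String) (k : String) (h : k ∈ d.keys) :
    (k, d.getD k "") ∈ d.items := by
  have h1 : d.get? k ≠ none := by
    rw [Ne, PySem.Dict.get?_eq_none_iff_not_mem_keys]; simpa using h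
  obtain ⟨v, hv⟩ := Option.ne_none_iff_exists'.mp h1
  have := PySem.Dict.mem_items_of_get?_eq_some d hv
  simpa [PySem.Dict.getD_eq_get?_getD, hv] using this
theorem eq_getD_of_mem_items (d : PySem.Dict String String) (hnd : d.keys.Nodup)
    (p : String × String) (h : p ∈ d.items) : p.2 = d.getD p.1 "" :=
  (PySem.Dict.getD_of_mem_items d (by simpa using h) hnd "").symm

theorem conflict_iff (d1 d2 : PySem.Dict String String)
    (hnd1 : d1.keys.Nodup) (hnd2 : d2.keys.Nodup)
    (hk : ∀ x, x ∈ d1.keys ↔ x ∈ d2.keys) :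
    (d1.items.any (tcConflict d2) = true) ↔
      ¬ ((PySem.Set.union (PySem.Set.ofList (d1.items.filter (fun p => p.2 != "")))
            (PySem.Set.ofList (d2.items.filter (fun p => p.2 != "")))).map Prod.fst).Nodup := by
  set pool := PySem.Set.union (PySem.Set.ofList (d1.items.filter (fun p => p.2 != "")))
                (PySem.Set.ofList (d2.items.filter (fun p => p.2 != ""))) with hpool
  have hmem := mem_pool d1 d2
  have hnd := nodup_pool d1 d2
  rw [← hpool] at hmem hnd
  constructor
  · rintro hany hnodup
    obtain ⟨p, hp, hc⟩ := List.any_eq_true.mp hany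
    have hc' : p.2 ≠ d2.getD p.1 "" ∧ p.2 ≠ "" ∧ d2.getD p.1 "" ≠ "" := by
      simpa [tcConflict, bne_iff_ne, and_assoc] using hc
    have hk1 : p.1 ∈ d1.keys := PySem.Dict.mem_keys_of_mem_items d1 hp
    have hk2 : p.1 ∈ d2.keys := (hk p.1).mp hk1
    have hq : (p.1, d2.getD p.1 "") ∈ d2.items := getD_mem_keys d2 p.1 hk2
    have hpin : p ∈ pool := (hmem p).mpr ⟨Or.inl hp, hc'.2.1⟩
    have hqin : (p.1, d2.getD p.1 "") ∈ pool := (hmem _).mpr ⟨Or.inr hq, hc'.2.2⟩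
    have := List.inj_on_of_nodup_map hnodup hpin hqin rfl
    exact hc'.1 (by simpa using congrArg Prod.snd this)
  · intro hnodup
    rw [List.nodup_map_iff_inj_on hnd] at hnodup
    push Not at hnodup
    obtain ⟨a, ha, b, hb, hfst, hne⟩ := hnodup
    have ha' := (hmem a).mp ha
    have hb' := (hmem b).mp hb
    have hsnd : a.2 ≠ b.2 := fun h => hne (Prod.ext hfst h)
    -- both in the same dict is impossible
    have key : ∀ x y : String × String, x ∈ d1.items → y ∈ d2.items → x.1 = y.1 → x.2 ≠ y.2 →
        x.2 ≠ "" → y.2 ≠ "" → d1.items.any (tcConflict d2) = true := by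
      intro x y hx hy hf hxy hx2 hy2
      refine List.any_eq_true.mpr ⟨x, hx, ?_⟩
      have : y.2 = d2.getD x.1 "" := (eq_getD_of_mem_items d2 hnd2 y hy).trans (by rw [hf])
      simp only [tcConflict, Bool.and_eq_true, bne_iff_ne]
      exact ⟨⟨this ▸ hxy, hx2⟩, this ▸ hy2⟩
    rcases ha'.1 with h1 | h1 <;> rcases hb'.1 with h2 | h2
    · exact absurd (Prod.ext hfst ((eq_getD_of_mem_items d1 hnd1 a h1).trans
        (hfst ▸ (eq_getD_of_mem_items d1 hnd1 b h2).symm))) hne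
    · exact key a b h1 h2 hfst hsnd ha'.2 hb'.2
    · exact key b a h2 h1 hfst.symm hsnd.symm hb'.2 ha'.2
    · exact absurd (Prod.ext hfst ((eq_getD_of_mem_items d2 hnd2 a h1).trans
        (hfst ▸ (eq_getD_of_mem_items d2 hnd2 b h2).symm))) hne

theorem values_agree (d1 d2 : PySem.Dict String String)
    (hnd1 : d1.keys.Nodup) (hnd2 : d2.keys.Nodup)
    (hk : ∀ x, x ∈ d1.keys ↔ x ∈ d2.keys)
    (hnodup : ((PySem.Set.union (PySem.Set.ofList (d1.items.filter (fun p => p.2 != "")))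
            (PySem.Set.ofList (d2.items.filter (fun p => p.2 != "")))).map Prod.fst).Nodup)
    (k : String) (hkmem : k ∈ d1.keys) :
    (PySem.Dict.ofList
        (PySem.Set.union (PySem.Set.ofList (d1.items.filter (fun p => p.2 != "")))
          (PySem.Set.ofList (d2.items.filter (fun p => p.2 != ""))))).getD k "" =
      (if d1.getD k "" != "" then d1.getD k "" else d2.getD k "") := by
  set pool := PySem.Set.union (PySem.Set.ofList (d1.items.filter (fun p => p.2 != "")))
                (PySem.Set.ofList (d2.items.filter (fun p => p.2 != ""))) with hpool
  have hmem := mem_pool d1 d2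
  rw [← hpool] at hmem
  set m := PySem.Dict.ofList pool with hm
  have hitems : m.items = pool := by
    show (pool.foldl (fun acc p => acc.insert p.1 p.2) PySem.Dict.empty).items = pool
    rw [PySem.Dict.items_foldl_insert_fresh pool Prod.fst Prod.snd PySem.Dict.empty
        (fun a _ => PySem.Dict.contains_empty _) hnodup]
    simp [PySem.Dict.empty]
  have hmk : m.keys.Nodup := by rw [PySem.Dict.keys, hitems]; exact hnodup
  by_cases h1 : d1.getD k "" = ""
  · by_cases h2 : d2.getD k "" = ""
    · have hnotin : k ∉ m.keys := by
        rw [PySem.Dict.keys, hitems]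
        intro hin
        obtain ⟨p, hp, hpk⟩ := List.mem_map.mp hin
        have := (hmem p).mp hp
        rcases this.1 with hd | hd
        · exact this.2 (by rw [eq_getD_of_mem_items d1 hnd1 p hd, hpk, h1])
        · exact this.2 (by rw [eq_getD_of_mem_items d2 hnd2 p hd, hpk, h2])
      have hnone : m.get? k = none := (PySem.Dict.get?_eq_none_iff_not_mem_keys m k).mpr hnotin
      simp only [PySem.Dict.getD_eq_get?_getD] at h1 h2 ⊢
      simp [hnone, h1, h2]
    · have hk2 : k ∈ d2.keys := (hk k).mp hkmem
      have hq : (k, d2.getD k "") ∈ pool := (hmem _).mpr ⟨Or.inr (getD_mem_keys d2 k hk2), h2⟩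
      rw [← hitems] at hq
      rw [PySem.Dict.getD_of_mem_items m hq hmk ""]
      simp [h1]
  · have hq : (k, d1.getD k "") ∈ pool := (hmem _).mpr ⟨Or.inl (getD_mem_keys d1 k hkmem), h1⟩
    rw [← hitems] at hq
    rw [PySem.Dict.getD_of_mem_items m hq hmk ""]
    simp [h1]


-- A's fused loop = conflict scan + fold of inserts, for any accumulator
theorem tcA_loop_eq (d2 : PySem.Dict String String) (items : List (String × String)) :
    ∀ ret, tcA_loop d2 items ret =
      if items.any (tcConflict d2) then none
      else some (items.foldl
        (fun r p => r.insert p.1 (if p.2 != "" then p.2 else d2.getD p.1 "")) ret) := by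
  induction items with
  | nil => intro ret; simp [tcA_loop]
  | cons p rest ih =>
      intro ret
      by_cases h : tcConflict d2 p = true
      · have h' : p.2 ≠ d2.getD p.1 "" ∧ p.2 ≠ "" ∧ d2.getD p.1 "" ≠ "" := by
          simpa [tcConflict, bne_iff_ne, and_assoc] using h
        simp [tcA_loop, h', List.any_cons, h]
      · have h' : ¬ (p.2 ≠ d2.getD p.1 "" ∧ p.2 ≠ "" ∧ d2.getD p.1 "" ≠ "") := by
          simpa [tcConflict, bne_iff_ne, and_assoc] using h
        have hf : tcConflict d2 p = false := by simpa using h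
        rw [tcA_loop, ih]
        simp only [List.any_cons, hf, Bool.false_or, List.foldl_cons]
        simp [h']

-- a list with a duplicate loses length under set()
theorem ofList_len_lt {α : Type} [BEq α] [LawfulBEq α] (xs : List α) (h : ¬ xs.Nodup) :
    (PySem.Set.ofList xs).length < xs.length := by
  induction xs with
  | nil => simp at h
  | cons x xs ih =>
    rw [PySem.Set.ofList_cons]
    by_cases hx : x ∈ xs
    · have hmem : x ∈ PySem.Set.ofList xs := by simp [PySem.Set.mem_ofList, hx]
      have h1 : (PySem.Set.discard (PySem.Set.ofList xs) x).length < (PySem.Set.ofList xs).length := by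
        simp only [PySem.Set.discard]
        exact List.length_filter_lt_length_iff_exists.mpr ⟨x, hmem, by simp⟩
      have hle := PySem.Set.length_ofList_le xs
      simp only [List.length_cons]
      omega
    · have h' : ¬ xs.Nodup := by simp [List.nodup_cons, hx] at h; exact h
      have h1 : (PySem.Set.discard (PySem.Set.ofList xs) x).length ≤ (PySem.Set.ofList xs).length := by
        simp only [PySem.Set.discard]; exact List.length_filter_le _ _
      have := ih h'
      simp only [List.length_cons]
      omega

-- merged's key list is set(pool.map fst)
theorem merged_keys (pool : List (String × String)) :
    (PySem.Dict.ofList pool).keys = PySem.Set.ofList (pool.map Prod.fst) := by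
  show (pool.foldl (fun acc p => acc.insert p.1 p.2) PySem.Dict.empty).keys = _
  rw [PySem.Dict.keys_foldl_insert_key pool Prod.fst (fun d x => x.2) PySem.Dict.empty]
  simp [PySem.Dict.keys_empty, PySem.Set.update_nil_left]

-- ===== VERDICT =====
theorem try_combine_py_spec : Claim_equal_try_combine_py := by
  unfold Claim_equal_try_combine_py
  intro stats1 stats2 _
  unfold Spec_try_combine_py try_combine_py try_combine_py_alt
  set d1 := PySem.Dict.ofList stats1 with hd1
  set d2 := PySem.Dict.ofList stats2 with hd2
  by_cases hkeq : PySem.Set.equal (PySem.Set.ofList d1.keys) (PySem.Set.ofList d2.keys) = false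
  · simp [hkeq]
  · simp only [hkeq]
    have hkt : PySem.Set.equal (PySem.Set.ofList d1.keys) (PySem.Set.ofList d2.keys) = true := by
      revert hkeq; cases PySem.Set.equal (PySem.Set.ofList d1.keys) (PySem.Set.ofList d2.keys) <;> simp
    have hkiff : ∀ x, x ∈ d1.keys ↔ x ∈ d2.keys := by
      have := (PySem.Set.equal_iff _ _).mp hkt
      simpa [PySem.Set.mem_ofList] using this
    have hnd1 := PySem.Dict.nodup_keys_ofList stats1
    have hnd2 := PySem.Dict.nodup_keys_ofList stats2
    rw [← hd1] at hnd1
    rw [← hd2] at hnd2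
    set pool := PySem.Set.union (PySem.Set.ofList (d1.items.filter (fun p => p.2 != "")))
                  (PySem.Set.ofList (d2.items.filter (fun p => p.2 != ""))) with hpool
    have hsize : (PySem.Dict.ofList pool).size = (PySem.Set.ofList (pool.map Prod.fst)).length := by
      show (PySem.Dict.ofList pool).items.length = _
      have : (PySem.Dict.ofList pool).keys.length = (PySem.Dict.ofList pool).items.length := by
        simp [PySem.Dict.keys]
      rw [← this, merged_keys]
    rw [tcA_loop_eq]
    by_cases hc : d1.items.any (tcConflict d2) = true
    · -- conflict: A returns none and B's cardinality test fires
      have hnn := (conflict_iff d1 d2 hnd1 hnd2 hkiff).mp hc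
      have hlt := ofList_len_lt (pool.map Prod.fst) hnn
      rw [List.length_map] at hlt
      have : (PySem.Dict.ofList pool).size ≠ pool.length := by rw [hsize]; omega
      simp [hc, this]
    · -- no conflict: both build the same combined row
      have hcf : d1.items.any (tcConflict d2) = false := by simpa using hc
      have hnodup : (pool.map Prod.fst).Nodup := by
        by_contra hnn
        exact hc ((conflict_iff d1 d2 hnd1 hnd2 hkiff).mpr hnn)
      have hsz : (PySem.Dict.ofList pool).size = pool.length := by
        rw [hsize, PySem.Set.ofList_eq_self_of_nodup _ hnodup, List.length_map]
      simp only [hcf, Bool.false_eq_true, if_false, Option.map_some]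
      rw [if_neg (not_ne_iff.mpr hsz)]
      -- A's fold over fresh distinct keys appends its items
      have hA : (d1.items.foldl
          (fun r p => r.insert p.1 (if p.2 != "" then p.2 else d2.getD p.1 "")) PySem.Dict.empty).items
          = d1.items.map (fun p => (p.1, if p.2 != "" then p.2 else d2.getD p.1 "")) := by
        rw [PySem.Dict.items_foldl_insert_fresh d1.items Prod.fst
            (fun p => if p.2 != "" then p.2 else d2.getD p.1 "") PySem.Dict.empty
            (fun a _ => PySem.Dict.contains_empty _) (by rw [← PySem.Dict.keys]; exact hnd1)]
        rfl
      rw [hA, PySem.Dict.items_eq_map_keys d1 hnd1 "", List.map_map]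
      refine congrArg some (List.map_congr_left ?_)
      intro k hkmem
      have hva := values_agree d1 d2 hnd1 hnd2 hkiff hnodup k hkmem
      rw [← hpool] at hva
      simp [Function.comp, hva]
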